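-- pv_equiv track=rewrite | github.com/annecathrinel/policy-corpus-builder | src/policy_corpus_builder/corpus_builder.py | _clean_jurisdictions
-- ===== SOURCE A (Python) =====
-- SUPPORTED_JURISDICTIONS = ("EU", "UK", "CA", "AUS", "NZ", "US")
--
-- class CorpusBuildValidationError(ValueError):
--     """Raised when the public corpus builder inputs are invalid."""
--
-- def _clean_jurisdictions(raw_jurisdictions: list[str]) -> tuple[str, ...]:
--     if not isinstance(raw_jurisdictions, list):
--         raise CorpusBuildValidationError("jurisdictions must be a list of strings.")
--     if not raw_jurisdictions:
--         raise CorpusBuildValidationError("jurisdictions must contain at least one value.")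
--
--     cleaned: list[str] = []
--     seen: set[str] = set()
--     for value in raw_jurisdictions:
--         if not isinstance(value, str) or not value.strip():
--             raise CorpusBuildValidationError(
--                 "jurisdictions must contain only non-empty strings."
--             )
--         jurisdiction = value.strip().upper()
--         if jurisdiction not in SUPPORTED_JURISDICTIONS:
--             allowed = ", ".join(SUPPORTED_JURISDICTIONS)
--             raise CorpusBuildValidationError(
--                 f"Unsupported jurisdiction '{value}'. Allowed values: {allowed}."
--             )
--         if jurisdiction not in seen:
--             seen.add(jurisdiction)
--             cleaned.append(jurisdiction)
--     return tuple(cleaned)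
-- ===== SOURCE B (Python) =====
-- SUPPORTED_JURISDICTIONS = ("EU", "UK", "CA", "AUS", "NZ", "US")
--
-- class CorpusBuildValidationError(ValueError):
--     """Raised when the public corpus builder inputs are invalid."""
--
-- def _clean_jurisdictions(raw_jurisdictions: list[str]) -> tuple[str, ...]:
--     if not isinstance(raw_jurisdictions, list):
--         raise CorpusBuildValidationError("jurisdictions must be a list of strings.")
--     if not raw_jurisdictions:
--         raise CorpusBuildValidationError("jurisdictions must contain at least one value.")
--
--     # declarative validation: whole-list predicate, no per-element loop state
--     if any(not isinstance(v, str) or not v.strip() for v in raw_jurisdictions):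
--         raise CorpusBuildValidationError(
--             "jurisdictions must contain only non-empty strings."
--         )
--
--     normalized = [v.strip().upper() for v in raw_jurisdictions]
--
--     bad = next(
--         (v for v, j in zip(raw_jurisdictions, normalized)
--          if j not in SUPPORTED_JURISDICTIONS),
--         None,
--     )
--     if bad is not None:
--         allowed = ", ".join(SUPPORTED_JURISDICTIONS)
--         raise CorpusBuildValidationError(
--             f"Unsupported jurisdiction '{bad}'. Allowed values: {allowed}."
--         )
--
--     # positional dedup: keep an entry iff it is the first occurrence of its value
--     return tuple(j for i, j in enumerate(normalized) if j not in normalized[:i])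
-- ===== Notes on version B (the rewrite author's own statement) =====
-- stated objective: alternative
-- what changed: Replaces A's single fused loop carrying (cleaned, seen) state with a stateless declarative pipeline: an any() predicate pass for emptiness validation, a comprehension to normalize, a next()-over-zip scan for the unsupported check, and a positional dedup comprehension keeping normalized[i] iff it does not occur in normalized[:i] (no seen-set, no accumulator).
import Mathlib
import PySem

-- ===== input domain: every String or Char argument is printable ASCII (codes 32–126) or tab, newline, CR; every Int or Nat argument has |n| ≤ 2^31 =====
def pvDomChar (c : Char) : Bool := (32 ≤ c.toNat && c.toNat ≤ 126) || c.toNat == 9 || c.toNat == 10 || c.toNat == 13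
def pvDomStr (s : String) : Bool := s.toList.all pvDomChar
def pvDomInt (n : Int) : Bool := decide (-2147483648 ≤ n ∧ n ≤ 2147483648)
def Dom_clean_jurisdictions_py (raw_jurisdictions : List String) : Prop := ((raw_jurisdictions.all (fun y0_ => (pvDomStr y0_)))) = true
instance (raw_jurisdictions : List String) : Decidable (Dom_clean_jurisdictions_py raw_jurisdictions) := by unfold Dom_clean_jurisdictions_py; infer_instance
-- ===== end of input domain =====

-- B replaces A's single fused loop carrying (cleaned, seen) with a stateless declarative pipeline:
-- whole-list validation predicates, a normalizing comprehension, and a positional dedup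
-- comprehension (keep normalized[i] iff it is absent from normalized[:i]); same values, not faster.

-- SUPPORTED_JURISDICTIONS (module constant, shared by both programs)
def SUPPORTED_JURISDICTIONS_py : List String := ["EU", "UK", "CA", "AUS", "NZ", "US"]

-- ===== PORT A =====
-- A's single loop over raw values, carrying (cleaned, seen).  The 'raise' branches return []:
-- those inputs are excluded by Pre_clean_jurisdictions_py below.
def pvLoopA : List String → List String → PySem.Set String → List String
  | [], cleaned, _ => cleaned
  | v :: rest, cleaned, seen =>
    if PySem.Str.strip v = "" then []  -- raise (not value.strip())
    else
      let j := PySem.Str.upper (PySem.Str.strip v)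
      if j ∉ SUPPORTED_JURISDICTIONS_py then []  -- raise (unsupported)
      else if PySem.Set.contains seen j then pvLoopA rest cleaned seen
      else pvLoopA rest (cleaned ++ [j]) (PySem.Set.add seen j)

def clean_jurisdictions_py (raw_jurisdictions : List String) : List String :=
  if raw_jurisdictions = [] then []  -- raise (empty list)
  else pvLoopA raw_jurisdictions [] PySem.Set.empty

-- ===== PORT B =====
def clean_jurisdictions_py_alt (raw_jurisdictions : List String) : List String :=
  if raw_jurisdictions = [] then []  -- raise (empty list)
  else if raw_jurisdictions.any (fun v => PySem.Str.strip v = "") then []  -- raise (any(...))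
  else
    let normalized := raw_jurisdictions.map (fun v => PySem.Str.upper (PySem.Str.strip v))
    -- next((v for v, j in zip(...) if j not in SUPPORTED_JURISDICTIONS), None)
    match (raw_jurisdictions.zip normalized).find?
        (fun p => !(SUPPORTED_JURISDICTIONS_py.contains p.2)) with
    | some _ => []  -- raise (unsupported)
    | none =>
      -- tuple(j for i, j in enumerate(normalized) if j not in normalized[:i])
      -- normalized[:i] = take i (exact: enumerate indices are ≥ 0)
      ((PySem.List.enumerate normalized).filter
        (fun p => !((normalized.take p.1.toNat).contains p.2))).map Prod.snd

-- ===== PRECONDITION & SPEC =====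
-- Pre_ excludes exactly the inputs where A raises CorpusBuildValidationError (empty list, an
-- entry that strips to empty, or a normalized entry outside SUPPORTED_JURISDICTIONS); B raises
-- on exactly the same input set.
def Pre_clean_jurisdictions_py (raw_jurisdictions : List String) : Prop :=
  raw_jurisdictions ≠ [] ∧
  ∀ v ∈ raw_jurisdictions,
    PySem.Str.strip v ≠ "" ∧ PySem.Str.upper (PySem.Str.strip v) ∈ SUPPORTED_JURISDICTIONS_py
instance (raw_jurisdictions : List String) : Decidable (Pre_clean_jurisdictions_py raw_jurisdictions) := by
  unfold Pre_clean_jurisdictions_py; infer_instance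

def pvWitness_clean_jurisdictions_py : List String := ["eu", " uk ", "EU", "nz"]

def Spec_clean_jurisdictions_py (raw_jurisdictions : List String) (out : List String) : Prop := out = clean_jurisdictions_py_alt raw_jurisdictions
instance (raw_jurisdictions : List String) (out : List String) : Decidable (Spec_clean_jurisdictions_py raw_jurisdictions out) := by unfold Spec_clean_jurisdictions_py; infer_instance

-- ===== CLAIM =====
def Claim_equal_clean_jurisdictions_py : Prop := ∀ (raw_jurisdictions : List String), Dom_clean_jurisdictions_py raw_jurisdictions → Pre_clean_jurisdictions_py raw_jurisdictions → Spec_clean_jurisdictions_py raw_jurisdictions (clean_jurisdictions_py raw_jurisdictions)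

-- ===== LEMMAS AND PROOFS =====

-- common reference: first-occurrence dedup of l relative to an already-seen list
def pvDd (seen : List String) : List String → List String
  | [] => []
  | x :: xs => if seen.contains x then pvDd seen xs else x :: pvDd (seen ++ [x]) xs

-- pvDd depends on seen only through membership
theorem pvDd_congr (xs : List String) : ∀ (s t : List String),
    (∀ y, s.contains y = t.contains y) → pvDd s xs = pvDd t xs := by
  induction xs with
  | nil => intro _ _ _; rfl
  | cons x xs ih =>
    intro s t h
    simp only [pvDd, h x]
    by_cases hc : t.contains x
    · rw [if_pos hc, if_pos hc, ih s t h]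
    · rw [if_neg hc, if_neg hc, ih (s ++ [x]) (t ++ [x]) ?_]
      intro y; simp only [List.contains_append, h y]

-- A side: folding Set.add appends exactly the first occurrences not already seen
theorem foldl_add_eq_dd (l : List String) : ∀ (pre : List String),
    l.foldl PySem.Set.add pre = pre ++ pvDd pre l := by
  induction l with
  | nil => intro pre; simp [pvDd]
  | cons x xs ih =>
    intro pre
    simp only [List.foldl_cons, pvDd, PySem.Set.add, PySem.Set.contains]
    by_cases hc : pre.contains x
    · rw [if_pos hc, if_pos hc, ih pre]
    · rw [if_neg hc, if_neg hc, ih (pre ++ [x])]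
      simp

-- B side: the positional filter over enumerate is the same first-occurrence dedup
theorem filter_enum_eq_dd (l : List String) : ∀ (pre : List String),
    ((PySem.List.enumerate l (pre.length : Int)).filter
      (fun p => !(((pre ++ l).take p.1.toNat).contains p.2))).map Prod.snd = pvDd pre l := by
  induction l with
  | nil => intro pre; simp [PySem.List.enumerate_nil, pvDd]
  | cons x xs ih =>
    intro pre
    rw [PySem.List.enumerate_cons]
    have htake : ((pre ++ x :: xs).take ((pre.length : Int)).toNat) = pre := by
      simp
    have hcast : (pre.length : Int) + 1 = ((pre ++ [x]).length : Int) := by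
      simp
    have happ : pre ++ x :: xs = (pre ++ [x]) ++ xs := by simp
    have htail :
        ((PySem.List.enumerate xs ((pre.length : Int) + 1)).filter
          (fun p => !(((pre ++ x :: xs).take p.1.toNat).contains p.2))).map Prod.snd
          = pvDd (pre ++ [x]) xs := by
      rw [hcast, happ]; exact ih (pre ++ [x])
    simp only [List.filter_cons, htake]
    by_cases hc : pre.contains x
    · have hm : x ∈ pre := by simpa using hc
      rw [if_neg (by simp [hm]), htail, pvDd, if_pos hc]
      refine pvDd_congr xs (pre ++ [x]) pre ?_
      intro y
      simp only [List.contains_append]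
      by_cases hy : y = x
      · subst hy; simp [hm]
      · simp [hy]
    · have hm : x ∉ pre := by simpa using hc
      rw [if_pos (by simp [hm]), List.map_cons, htail, pvDd, if_neg hc]

-- In A's loop, on valid input the loop is a fold of Set.add over the raw values' normal forms.
theorem pvLoopA_valid (xs : List String) :
    (∀ v ∈ xs, PySem.Str.strip v ≠ "" ∧ PySem.Str.upper (PySem.Str.strip v) ∈ SUPPORTED_JURISDICTIONS_py) →
    ∀ acc : List String,
      pvLoopA xs acc acc = xs.foldl (fun s v => PySem.Set.add s (PySem.Str.upper (PySem.Str.strip v))) acc := by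
  induction xs with
  | nil => intro _ acc; rfl
  | cons v rest ih =>
    intro h acc
    obtain ⟨hne, hmem⟩ := h v (List.mem_cons_self ..)
    have hrest := fun w hw => h w (List.mem_cons_of_mem _ hw)
    simp only [pvLoopA, List.foldl_cons, if_neg hne, if_neg (not_not_intro hmem)]
    by_cases hc : PySem.Set.contains acc (PySem.Str.upper (PySem.Str.strip v))
    · have hadd : PySem.Set.add acc (PySem.Str.upper (PySem.Str.strip v)) = acc := by
        rw [PySem.Set.add, if_pos hc]
      rw [if_pos hc, hadd, ih hrest]
    · have hadd : PySem.Set.add acc (PySem.Str.upper (PySem.Str.strip v))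
          = acc ++ [PySem.Str.upper (PySem.Str.strip v)] := by
        rw [PySem.Set.add, if_neg hc]
      rw [if_neg hc, hadd, ih hrest]

-- ===== VERDICT =====
theorem clean_jurisdictions_py_spec : Claim_equal_clean_jurisdictions_py := by
  intro raw _ hpre
  obtain ⟨hne, hvalid⟩ := hpre
  unfold Spec_clean_jurisdictions_py clean_jurisdictions_py clean_jurisdictions_py_alt
  have hany : raw.any (fun v => decide (PySem.Str.strip v = "")) = false := by
    simp only [List.any_eq_false, decide_eq_true_eq]
    exact fun v hv => (hvalid v hv).1
  have hfind : (raw.zip (raw.map (fun v => PySem.Str.upper (PySem.Str.strip v)))).find?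
      (fun p => !(SUPPORTED_JURISDICTIONS_py.contains p.2)) = none := by
    rw [List.find?_eq_none]
    intro p hp
    have h2 : p.2 ∈ raw.map (fun v => PySem.Str.upper (PySem.Str.strip v)) :=
      (List.of_mem_zip hp).2
    obtain ⟨v, hv, hpv⟩ := List.mem_map.mp h2
    have := (hvalid v hv).2
    rw [hpv] at this
    simp [this]
  rw [if_neg hne, if_neg hne, hany]
  simp only [Bool.false_eq_true, if_false, hfind]
  have hempty : (PySem.Set.empty : PySem.Set String) = ([] : List String) := rfl
  rw [hempty, pvLoopA_valid raw hvalid []]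
  rw [show raw.foldl (fun s v => PySem.Set.add s (PySem.Str.upper (PySem.Str.strip v))) []
      = (raw.map (fun v => PySem.Str.upper (PySem.Str.strip v))).foldl PySem.Set.add [] from
    List.foldl_map.symm]
  rw [foldl_add_eq_dd _ []]
  have := filter_enum_eq_dd (raw.map (fun v => PySem.Str.upper (PySem.Str.strip v))) []
  simpa using this.symm
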